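-- pv_equiv track=rewrite | github.com/gaplin/Advent_of_Code_2015 | 20/day20p2.py | get_present_count
-- ===== SOURCE A (Python) =====
-- def get_present_count(N: int) -> int:
--     result = 0
--     i = 1
--     while i * i <= N:
--         if N % i == 0:
--             first = i
--             if first * 50 >= N:
--                 result += first * 11
--             second = N // first
--             if second != i and second * 50 >= N:
--                 result += second * 11
--         i += 1
--
--     return result
-- ===== SOURCE B (Python) =====
-- def get_present_count(N: int) -> int:
--     # Each elf e delivers to its first 50 multiples; house N is served by elf N//e
--     # exactly when the cofactor e = N // d is at most 50.  So instead of scanning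
--     # i up to sqrt(N) for divisor pairs, enumerate the small cofactors 1..50.
--     if N <= 0:
--         return 0
--     result = 0
--     for e in range(1, 51):
--         if N % e == 0:
--             result += 11 * (N // e)
--     return result
-- ===== Notes on version B (the rewrite author's own statement) =====
-- stated objective: faster
-- what changed: B enumerates the at-most-50 small cofactors e = N//d (adding 11*(N//e) when e divides N) instead of scanning i up to sqrt(N) collecting divisor pairs, using that d*50 >= N is equivalent to N//d <= 50.
import Mathlib
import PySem

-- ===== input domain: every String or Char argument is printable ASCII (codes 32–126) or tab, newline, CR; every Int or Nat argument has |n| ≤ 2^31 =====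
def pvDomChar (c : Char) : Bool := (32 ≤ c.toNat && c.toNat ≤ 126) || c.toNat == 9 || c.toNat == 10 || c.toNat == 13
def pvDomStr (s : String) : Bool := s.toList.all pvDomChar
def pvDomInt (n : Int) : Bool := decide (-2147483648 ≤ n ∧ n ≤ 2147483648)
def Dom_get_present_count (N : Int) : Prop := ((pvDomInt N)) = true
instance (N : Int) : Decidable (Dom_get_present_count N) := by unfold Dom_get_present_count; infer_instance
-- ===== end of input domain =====

-- B replaces A's scan of i up to sqrt(N) collecting divisor pairs by a fixed loop over the
-- at-most-50 small cofactors e = N // d (faster; proved to return the same value for every N).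

-- ===== PORT A =====
-- the 'while i * i <= N' loop of A, with its accumulator 'result'
def getLoopA (N i result : Int) : Int :=
  if i * i ≤ N then
    getLoopA N (i + 1)
      (if PySem.Int.mod N i = 0 then
        -- first = i
        let result1 := if i * 50 ≥ N then result + i * 11 else result
        let second := PySem.Int.floordiv N i
        if second ≠ i ∧ second * 50 ≥ N then result1 + second * 11 else result1
      else result)
  else result
termination_by (N + 1 - i).toNat
decreasing_by
  have hiN : i ≤ N := by nlinarith [mul_self_nonneg (2 * i - 1)]
  omega

def get_present_count (N : Int) : Int := getLoopA N 1 0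

-- ===== PORT B =====
def get_present_count_alt (N : Int) : Int :=
  if N ≤ 0 then 0
  else
    (PySem.List.pyRange 1 51 1).foldl
      (fun result e =>
        if PySem.Int.mod N e = 0 then result + 11 * PySem.Int.floordiv N e else result) 0

-- ===== PRECONDITION & SPEC =====
def Spec_get_present_count (N : Int) (out : Int) : Prop := out = get_present_count_alt N
instance (N : Int) (out : Int) : Decidable (Spec_get_present_count N out) := by unfold Spec_get_present_count; infer_instance

-- ===== CLAIM (what is proved, stated in full; the proofs are below) =====
def Claim_equal_get_present_count : Prop := ∀ (N : Int), Dom_get_present_count N → Spec_get_present_count N (get_present_count N)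

-- ===== LEMMAS AND PROOFS =====

-- Nat-level value of one divisor d's contribution: 11*d if d*50 ≥ n
def tFn (n d : ℕ) : ℕ := if n ≤ d * 50 then d * 11 else 0

-- what one iteration i of A's loop adds to 'result'
def hsFn (n i : ℕ) : ℕ :=
  (if n % i = 0 then tFn n i else 0) +
  (if n % i = 0 ∧ ¬ n / i = i then tFn n (n / i) else 0)

-- what one iteration e of B's loop adds to 'result'
def bsFn (n e : ℕ) : ℕ := if n % e = 0 then 11 * (n / e) else 0

-- the common divisor-sum both loops compute
def dVal (n : ℕ) : ℕ := ∑ d ∈ n.divisors, tFn n d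

lemma loopA_step (n j : ℕ) (r : Int) :
    (if PySem.Int.mod (n : Int) (j : Int) = 0 then
        let result1 := if (j : Int) * 50 ≥ (n : Int) then r + (j : Int) * 11 else r
        let second := PySem.Int.floordiv (n : Int) (j : Int)
        if second ≠ (j : Int) ∧ second * 50 ≥ (n : Int) then result1 + second * 11 else result1
      else r) = r + (hsFn n j : Int) := by
  rw [PySem.Int.mod_natCast, PySem.Int.floordiv_natCast]
  have hm : ((n % j : ℕ) : Int) = 0 ↔ n % j = 0 := by exact_mod_cast Iff.rfl
  have h50 : ((j : Int) * 50 ≥ (n : Int)) ↔ n ≤ j * 50 := by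
    constructor <;> intro h <;> exact_mod_cast h
  have h50' : (((n / j : ℕ) : Int) * 50 ≥ (n : Int)) ↔ n ≤ (n / j) * 50 := by
    constructor <;> intro h <;> exact_mod_cast h
  have hne : (((n / j : ℕ) : Int) ≠ (j : Int)) ↔ ¬ n / j = j := by
    exact not_congr Nat.cast_inj
  simp only [hsFn, tFn, hm, h50, h50', hne]
  split_ifs <;> first | tauto | (push_cast; ring)

lemma loopA_bridge (n : ℕ) : ∀ (t j : ℕ) (r : Int), 1 ≤ j → Nat.sqrt n + 1 ≤ j + t →
    getLoopA (n : Int) (j : Int) r = r + ((∑ m ∈ Finset.Ico j (Nat.sqrt n + 1), hsFn n m : ℕ) : Int) := by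
  intro t
  induction t with
  | zero =>
    intro j r hj ht
    rw [getLoopA, if_neg, Finset.Ico_eq_empty (by omega)]
    · simp
    · intro h
      have : j * j ≤ n := by exact_mod_cast h
      have : j ≤ Nat.sqrt n := Nat.le_sqrt.mpr this
      omega
  | succ t ih =>
    intro j r hj ht
    by_cases hjk : j ≤ Nat.sqrt n
    · rw [getLoopA, if_pos (by exact_mod_cast Nat.le_sqrt.mp hjk)]
      rw [loopA_step n j r]
      have hcast : ((j : Int) + 1) = ((j + 1 : ℕ) : Int) := by push_cast; ring
      rw [hcast, ih (j + 1) _ (by omega) (by omega)]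
      rw [Finset.sum_eq_sum_Ico_succ_bot (by omega : j < Nat.sqrt n + 1) (hsFn n)]
      push_cast
      ring
    · rw [getLoopA, if_neg, Finset.Ico_eq_empty (by omega)]
      · simp
      · intro h
        have : j * j ≤ n := by exact_mod_cast h
        exact hjk (Nat.le_sqrt.mpr this)

lemma loopB_bridge (n : ℕ) : ∀ (t a : ℕ) (r : Int), 1 ≤ a → 51 ≤ a + t →
    (PySem.List.pyRange (a : Int) 51 1).foldl
      (fun result e =>
        if PySem.Int.mod (n : Int) e = 0 then result + 11 * PySem.Int.floordiv (n : Int) e else result) r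
    = r + ((∑ e ∈ Finset.Ico a 51, bsFn n e : ℕ) : Int) := by
  intro t
  induction t with
  | zero =>
    intro a r ha ht
    rw [PySem.List.pyRange_one_eq_nil (by exact_mod_cast (by omega : 51 ≤ a)),
      Finset.Ico_eq_empty (by omega)]
    simp
  | succ t ih =>
    intro a r ha ht
    by_cases hab : a < 51
    · rw [PySem.List.pyRange_one_cons (by exact_mod_cast hab), List.foldl_cons]
      have hstep : (if PySem.Int.mod (n : Int) (a : Int) = 0
            then r + 11 * PySem.Int.floordiv (n : Int) (a : Int) else r)
          = r + (bsFn n a : Int) := by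
        rw [PySem.Int.mod_natCast, PySem.Int.floordiv_natCast]
        have hm : ((n % a : ℕ) : Int) = 0 ↔ n % a = 0 := by exact_mod_cast Iff.rfl
        simp only [bsFn, hm]
        split_ifs <;> push_cast <;> ring
      rw [hstep]
      have hcast : ((a : Int) + 1) = ((a + 1 : ℕ) : Int) := by push_cast; ring
      rw [hcast, ih (a + 1) _ (by omega) (by omega)]
      rw [Finset.sum_eq_sum_Ico_succ_bot (by omega : a < 51) (bsFn n)]
      push_cast
      ring
    · rw [PySem.List.pyRange_one_eq_nil (by exact_mod_cast (by omega : 51 ≤ a)),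
        Finset.Ico_eq_empty (by omega)]
      simp

-- divisibility-condition bookkeeping
lemma div_cond_iff (n d : ℕ) (hd : d ∣ n) (hd0 : 0 < d) : n / d ≤ 50 ↔ n ≤ d * 50 := by
  obtain ⟨c, rfl⟩ := hd
  rw [Nat.mul_div_cancel_left c hd0]
  constructor
  · intro h; exact Nat.mul_le_mul_left d h
  · intro h; exact Nat.le_of_mul_le_mul_left h hd0

-- B's loop sum equals the divisor sum
lemma sumB_eq_dVal (n : ℕ) (hn : 1 ≤ n) : ∑ e ∈ Finset.Ico 1 51, bsFn n e = dVal n := by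
  have hset : (Finset.Ico 1 51).filter (fun e => n % e = 0) = n.divisors.filter (fun e => e ≤ 50) := by
    ext e
    simp only [Finset.mem_filter, Finset.mem_Ico, Nat.mem_divisors]
    constructor
    · rintro ⟨⟨h1, h2⟩, h3⟩
      exact ⟨⟨Nat.dvd_iff_mod_eq_zero.mpr h3, by omega⟩, by omega⟩
    · rintro ⟨⟨h1, _⟩, h2⟩
      have he1 : 1 ≤ e := Nat.pos_of_dvd_of_pos h1 (by omega)
      exact ⟨⟨he1, by omega⟩, Nat.dvd_iff_mod_eq_zero.mp h1⟩
  have h1 : ∑ e ∈ Finset.Ico 1 51, bsFn n e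
      = ∑ e ∈ n.divisors.filter (fun e => e ≤ 50), 11 * (n / e) := by
    rw [← hset, Finset.sum_filter]
    exact Finset.sum_congr rfl (fun e _ => by simp [bsFn])
  rw [h1, Finset.sum_filter]
  have h2 : ∑ d ∈ n.divisors, (fun d => if d ≤ 50 then 11 * (n / d) else 0) (n / d)
      = ∑ d ∈ n.divisors, (if d ≤ 50 then 11 * (n / d) else 0) :=
    Nat.sum_div_divisors n (fun d => if d ≤ 50 then 11 * (n / d) else 0)
  rw [← h2]
  apply Finset.sum_congr rfl
  intro d hd
  rw [Nat.mem_divisors] at hd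
  have hd0 : 0 < d := Nat.pos_of_dvd_of_pos hd.1 (by omega)
  show (if n / d ≤ 50 then 11 * (n / (n / d)) else 0) = tFn n d
  rw [Nat.div_div_self hd.1 (by omega)]
  simp only [tFn, div_cond_iff n d hd.1 hd0]
  split_ifs <;> ring

-- a divisor a ≤ √n with cofactor ≠ a has its cofactor strictly above √n
lemma small_to_large (n a : ℕ) (_hn : 1 ≤ n) (ha1 : 1 ≤ a) (hak : a ≤ Nat.sqrt n)
    (had : a ∣ n) (hne : n / a ≠ a) : Nat.sqrt n < n / a := by
  have hk1 : 1 ≤ Nat.sqrt n := by omega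
  have hkk : Nat.sqrt n * Nat.sqrt n ≤ n := Nat.sqrt_le n
  have h1 : Nat.sqrt n ≤ n / Nat.sqrt n := (Nat.le_div_iff_mul_le (by omega)).mpr hkk
  have h2 : n / Nat.sqrt n ≤ n / a := Nat.div_le_div_left hak (by omega)
  have hge : Nat.sqrt n ≤ n / a := le_trans h1 h2
  rcases Nat.lt_or_ge (Nat.sqrt n) (n / a) with h | h
  · exact h
  · exfalso
    have heq : n / a = Nat.sqrt n := le_antisymm h hge
    have hmul : a * (n / a) = n := Nat.mul_div_cancel' had
    rw [heq] at hmul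
    by_cases hae : a = Nat.sqrt n
    · exact hne (by rw [heq, hae])
    · have h3 : a * Nat.sqrt n < Nat.sqrt n * Nat.sqrt n :=
        Nat.mul_lt_mul_of_lt_of_le (by omega) (le_refl _) (by omega)
      linarith
-- a divisor above √n has its cofactor in [1, √n]
lemma large_to_small (n d : ℕ) (hn : 1 ≤ n) (hd : d ∣ n) (hdk : Nat.sqrt n < d) :
    1 ≤ n / d ∧ n / d ≤ Nat.sqrt n := by
  have hdn : d ≤ n := Nat.le_of_dvd (by omega) hd
  refine ⟨Nat.div_pos hdn (by omega), ?_⟩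
  have h1 : n / d ≤ n / (Nat.sqrt n + 1) := Nat.div_le_div_left hdk (by omega)
  have h2 : n / (Nat.sqrt n + 1) < Nat.sqrt n + 1 :=
    (Nat.div_lt_iff_lt_mul (by omega)).mpr (Nat.lt_succ_sqrt n)
  omega

-- A's loop sum equals the divisor sum
lemma sumA_eq_dVal (n : ℕ) (hn : 1 ≤ n) :
    ∑ m ∈ Finset.Ico 1 (Nat.sqrt n + 1), hsFn n m = dVal n := by
  unfold hsFn dVal
  rw [Finset.sum_add_distrib,
    ← Finset.sum_filter_add_sum_filter_not n.divisors (fun d => d ≤ Nat.sqrt n) (tFn n)]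
  congr 1
  · rw [← Finset.sum_filter]
    apply Finset.sum_congr
    · ext e
      simp only [Finset.mem_filter, Finset.mem_Ico, Nat.mem_divisors]
      constructor
      · rintro ⟨⟨h1, h2⟩, h3⟩
        exact ⟨⟨Nat.dvd_iff_mod_eq_zero.mpr h3, by omega⟩, by omega⟩
      · rintro ⟨⟨h1, _⟩, h2⟩
        have := Nat.pos_of_dvd_of_pos h1 (by omega)
        exact ⟨⟨by omega, by omega⟩, Nat.dvd_iff_mod_eq_zero.mp h1⟩
    · intro x _; rfl
  · rw [← Finset.sum_filter]
    refine Finset.sum_nbij' (fun m => n / m) (fun d => n / d) ?_ ?_ ?_ ?_ ?_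
    · intro a ha
      simp only [Finset.mem_filter, Finset.mem_Ico, Nat.mem_divisors] at ha ⊢
      obtain ⟨⟨ha1, hak⟩, hmod, hne⟩ := ha
      have had : a ∣ n := Nat.dvd_iff_mod_eq_zero.mpr hmod
      exact ⟨⟨Nat.div_dvd_of_dvd had, by omega⟩,
        Nat.not_le.mpr (small_to_large n a hn ha1 (by omega) had hne)⟩
    · intro d hd
      simp only [Finset.mem_filter, Nat.mem_divisors, Finset.mem_Ico] at hd ⊢
      obtain ⟨⟨hdvd, _⟩, hgt⟩ := hd
      have hdk : Nat.sqrt n < d := by omega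
      obtain ⟨hx1, hx2⟩ := large_to_small n d hn hdvd hdk
      refine ⟨⟨hx1, by omega⟩, Nat.dvd_iff_mod_eq_zero.mp (Nat.div_dvd_of_dvd hdvd), ?_⟩
      rw [Nat.div_div_self hdvd (by omega)]
      omega
    · intro a ha
      simp only [Finset.mem_filter, Finset.mem_Ico] at ha
      exact Nat.div_div_self (Nat.dvd_iff_mod_eq_zero.mpr ha.2.1) (by omega)
    · intro d hd
      simp only [Finset.mem_filter, Nat.mem_divisors] at hd
      exact Nat.div_div_self hd.1.1 (by omega)
    · intro a _; rfl

theorem get_present_count_spec : Claim_equal_get_present_count := by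
  intro N _
  unfold Spec_get_present_count
  by_cases hN : N ≤ 0
  · rw [get_present_count, getLoopA, if_neg (by nlinarith), get_present_count_alt, if_pos hN]
  · have hN' : 0 < N := lt_of_not_ge hN
    lift N to ℕ using le_of_lt hN' with n
    have hn : 1 ≤ n := by exact_mod_cast hN'
    have ha := loopA_bridge n (Nat.sqrt n + 1) 1 0 (by omega) (by omega)
    have hb := loopB_bridge n 51 1 0 (by omega) (by omega)
    rw [Nat.cast_one] at ha hb
    rw [get_present_count, ha, zero_add]
    rw [get_present_count_alt, if_neg (by omega), hb, zero_add]
    rw [sumA_eq_dVal n hn, sumB_eq_dVal n hn]
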